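-- pv_equiv track=rewrite | github.com/tedee09/swarm-robot-gui | ros2_ws/src/path_planner/path_planner/path_planner_node.py | compute_clearance
-- ===== SOURCE A (Python) =====
-- from collections import deque
--
-- def compute_clearance(grid):
--     H, W = len(grid), len(grid[0])
--     INF = 10**9
--     dist = [[INF]*W for _ in range(H)]
--     q = deque()
--     for y in range(H):
--         for x in range(W):
--             if grid[y][x] == 1:
--                 dist[y][x] = 0
--                 q.append((y, x))
--     while q:
--         y, x = q.popleft()
--         for dy, dx in [(-1,0), (1,0), (0,-1), (0,1)]:
--             ny, nx = y + dy, x + dx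
--             if 0 <= ny < H and 0 <= nx < W and dist[ny][nx] == INF:
--                 dist[ny][nx] = dist[y][x] + 1
--                 q.append((ny, nx))
--     return dist
-- ===== SOURCE B (Python) =====
-- def compute_clearance(grid):
--     H, W = len(grid), len(grid[0])
--     INF = 10**9
--     obstacles = [(y, x) for y in range(H) for x in range(W) if grid[y][x] == 1]
--     return [[min((abs(y - oy) + abs(x - ox) for oy, ox in obstacles), default=INF)
--              for x in range(W)] for y in range(H)]
-- ===== Notes on version B (the rewrite author's own statement) =====
-- stated objective: simpler
-- what changed: Replaces the multi-source BFS with a mutable dist array and deque by a direct closed-form computation: collect the obstacle cells once, then build each output cell as the minimum Manhattan distance to any obstacle (INF if there are none).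
import Mathlib
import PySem

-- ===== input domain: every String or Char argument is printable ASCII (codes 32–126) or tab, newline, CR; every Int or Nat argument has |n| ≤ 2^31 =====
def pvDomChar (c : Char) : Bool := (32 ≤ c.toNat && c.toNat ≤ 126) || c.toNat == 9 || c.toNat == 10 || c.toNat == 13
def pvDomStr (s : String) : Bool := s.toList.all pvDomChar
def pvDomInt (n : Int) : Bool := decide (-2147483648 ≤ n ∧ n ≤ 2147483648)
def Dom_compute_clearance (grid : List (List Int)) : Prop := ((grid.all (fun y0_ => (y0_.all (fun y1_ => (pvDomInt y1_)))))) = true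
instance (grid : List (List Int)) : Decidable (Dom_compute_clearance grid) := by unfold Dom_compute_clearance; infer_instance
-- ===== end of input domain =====

-- B replaces A's multi-source BFS (mutable dist grid + deque) by a direct closed form:
-- each output cell is the minimum Manhattan distance to any obstacle cell (INF if none).
-- Objective: simpler (no mutable state, no queue); not faster.

-- ===== PORT A =====
-- A's sentinel INF = 10**9
def ccINF : Int := 10 ^ 9

-- dist[y][x] read / write on the list-of-lists grid (indices produced by A are always in range)
def ccGet (dist : List (List Int)) (y x : Nat) : Int := (dist.getD y []).getD x 0

def ccSet (dist : List (List Int)) (y x : Nat) (v : Int) : List (List Int) :=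
  dist.set y ((dist.getD y []).set x v)

-- the literal direction list [(-1,0), (1,0), (0,-1), (0,1)]
def ccDirs : List (Int × Int) := [(-1, 0), (1, 0), (0, -1), (0, 1)]

-- body of A's inner `for dy, dx in …` loop: guarded relax of one neighbour of popped (y,x)
def ccStep (H W : Nat) (y x : Nat) (s : List (List Int) × List (Nat × Nat)) (d : Int × Int) :
    List (List Int) × List (Nat × Nat) :=
  let ny : Int := (y : Int) + d.1
  let nx : Int := (x : Int) + d.2
  if 0 ≤ ny ∧ ny < (H : Int) ∧ 0 ≤ nx ∧ nx < (W : Int) ∧ ccGet s.1 ny.toNat nx.toNat = ccINF then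
    (ccSet s.1 ny.toNat nx.toNat (ccGet s.1 y x + 1), s.2 ++ [(ny.toNat, nx.toNat)])
  else s

-- A's `while q:` loop; the fuel argument only makes the recursion total (proved sufficient below)
def ccLoop (H W : Nat) : Nat → List (List Int) → List (Nat × Nat) → List (List Int)
  | _, dist, [] => dist
  | 0, dist, _ :: _ => dist
  | fuel + 1, dist, (y, x) :: q =>
      let p := ccDirs.foldl (ccStep H W y x) (dist, q)
      ccLoop H W fuel p.1 p.2

-- A's seeding double loop: dist = [[INF]*W …]; obstacles get 0 and are appended to q in order
def ccInit (grid : List (List Int)) (H W : Nat) : List (List Int) × List (Nat × Nat) :=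
  (List.range H).foldl
    (fun s y => (List.range W).foldl
      (fun s x => if (grid.getD y []).getD x 0 = 1 then (ccSet s.1 y x 0, s.2 ++ [(y, x)]) else s) s)
    (List.replicate H (List.replicate W ccINF), [])

def compute_clearance (grid : List (List Int)) : List (List Int) :=
  let H := grid.length
  let W := (grid.headD []).length
  let p := ccInit grid H W
  ccLoop H W (6 * H * W + 1) p.1 p.2

-- ===== PORT B =====
def compute_clearance_alt (grid : List (List Int)) : List (List Int) :=
  let H := grid.length
  let W := (grid.headD []).length
  let obstacles := (List.range H).flatMap (fun y =>
    (List.range W).filterMap (fun x =>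
      if (grid.getD y []).getD x 0 = 1 then some (y, x) else none))
  (List.range H).map (fun (y : Nat) => (List.range W).map (fun (x : Nat) =>
    ((obstacles.map (fun o => |(y : Int) - (o.1 : Int)| + |(x : Int) - (o.2 : Int)|)).min?).getD (10 ^ 9)))

-- ===== PRECONDITION & SPEC =====
-- Pre_ excludes (i) inputs where A raises IndexError: the empty grid ([] has no grid[0]) and
-- grids with a row shorter than the first row; (ii) grids with H + W > 10^9 + 1, where a true
-- distance can reach the sentinel INF = 10^9 and A's returned values become order-dependent
-- accidents of the queue (such inputs are astronomically large and A effectively diverges there).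
def Pre_compute_clearance (grid : List (List Int)) : Prop :=
  grid ≠ [] ∧ (∀ row ∈ grid, (grid.headD []).length ≤ row.length) ∧
    (grid.length : Int) + ((grid.headD []).length : Int) ≤ 10 ^ 9 + 1
instance (grid : List (List Int)) : Decidable (Pre_compute_clearance grid) := by
  unfold Pre_compute_clearance; infer_instance

def pvWitness_compute_clearance : List (List Int) := [[1, 0], [0, 0]]

def Spec_compute_clearance (grid : List (List Int)) (out : List (List Int)) : Prop := out = compute_clearance_alt grid
instance (grid : List (List Int)) (out : List (List Int)) : Decidable (Spec_compute_clearance grid out) := by unfold Spec_compute_clearance; infer_instance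

-- ===== CLAIM (what is proved, stated in full; the proofs are below) =====
def Claim_equal_compute_clearance : Prop := ∀ (grid : List (List Int)), Dom_compute_clearance grid → Pre_compute_clearance grid → Spec_compute_clearance grid (compute_clearance grid)

-- ===== LEMMAS AND PROOFS =====

-- the obstacle list (cells holding 1), exactly as B collects it
def ccObs (grid : List (List Int)) : List (Nat × Nat) :=
  (List.range grid.length).flatMap (fun y =>
    (List.range (grid.headD []).length).filterMap (fun x =>
      if (grid.getD y []).getD x 0 = 1 then some (y, x) else none))

-- Manhattan distance between two cells
def ccD1 (a b : Nat × Nat) : Int := |(a.1 : Int) - (b.1 : Int)| + |(a.2 : Int) - (b.2 : Int)|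

-- the target value of a cell: min Manhattan distance to an obstacle, INF if none
def ccT (obs : List (Nat × Nat)) (c : Nat × Nat) : Int := ((obs.map (ccD1 c)).min?).getD ccINF

def ccAdj (a b : Nat × Nat) : Prop := ccD1 a b = 1

def ccShape (H W : Nat) (dist : List (List Int)) : Prop :=
  dist.length = H ∧ ∀ r ∈ dist, r.length = W

def ccInfCount (H W : Nat) (dist : List (List Int)) : Nat :=
  (((Finset.range H) ×ˢ (Finset.range W)).filter (fun c => ccGet dist c.1 c.2 = ccINF)).card

def ccRel (obs : List (Nat × Nat)) (a b : Nat × Nat) : Prop :=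
  ccT obs a ≤ ccT obs b ∧ ccT obs b ≤ ccT obs a + 1

-- The BFS loop invariant
structure CCInv (H W : Nat) (obs : List (Nat × Nat)) (dist : List (List Int)) (q : List (Nat × Nat)) : Prop where
  shape : ccShape H W dist
  qmem : ∀ e ∈ q, e.1 < H ∧ e.2 < W
  vals : ∀ y < H, ∀ x < W, ccGet dist y x ≠ ccINF → ccGet dist y x = ccT obs (y, x)
  qset : ∀ e ∈ q, ccGet dist e.1 e.2 ≠ ccINF
  mono : q.Pairwise (ccRel obs)
  lower : ∀ y < H, ∀ x < W, ccGet dist y x = ccINF → ∀ e ∈ q, ccT obs e ≤ ccT obs (y, x)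
  closed : ∀ y < H, ∀ x < W, ccGet dist y x ≠ ccINF → (y, x) ∉ q →
    ∀ n : Nat × Nat, n.1 < H → n.2 < W → ccAdj (y, x) n → ccGet dist n.1 n.2 ≠ ccINF
  zero : ∀ y < H, ∀ x < W, ccT obs (y, x) = 0 → ccGet dist y x ≠ ccINF


-- ---- basic array lemmas ----

theorem ccRow_length {H W : Nat} {dist : List (List Int)} (h : ccShape H W dist) {y : Nat}
    (hy : y < H) : (dist.getD y []).length = W := by
  obtain ⟨hl, hr⟩ := h
  have hyl : y < dist.length := by omega
  have : dist.getD y [] = dist[y] := by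
    simp [List.getD_eq_getElem?_getD, List.getElem?_eq_getElem hyl]
  rw [this]
  exact hr _ (List.getElem_mem hyl)

theorem ccShape_set {H W : Nat} {dist : List (List Int)} (h : ccShape H W dist) {y x : Nat}
    (hy : y < H) (hx : x < W) (v : Int) : ccShape H W (ccSet dist y x v) := by
  obtain ⟨hl, hr⟩ := h
  refine ⟨by simp [ccSet, hl], ?_⟩
  intro r hrmem
  rcases List.mem_or_eq_of_mem_set hrmem with hm | he
  · exact hr _ hm
  · rw [he]; rw [List.length_set]; exact ccRow_length ⟨hl, hr⟩ hy

theorem ccGet_set_self {H W : Nat} {dist : List (List Int)} (h : ccShape H W dist) {y x : Nat}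
    (hy : y < H) (hx : x < W) (v : Int) : ccGet (ccSet dist y x v) y x = v := by
  have hyl : y < dist.length := h.1 ▸ hy
  have hrow : (dist.getD y []).length = W := ccRow_length h hy
  have h1 : (ccSet dist y x v).getD y [] = (dist.getD y []).set x v := by
    simp [ccSet, List.getD_eq_getElem?_getD, List.getElem?_set_self hyl]
  rw [ccGet, h1, List.getD_eq_getElem?_getD, List.getElem?_set_self (by rw [hrow]; exact hx)]
  rfl

theorem ccGet_set_ne {H W : Nat} {dist : List (List Int)} (h : ccShape H W dist) {y x : Nat}
    (hy : y < H) (hx : x < W) (v : Int) {y' x' : Nat} (hne : (y', x') ≠ (y, x)) :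
    ccGet (ccSet dist y x v) y' x' = ccGet dist y' x' := by
  have hyl : y < dist.length := h.1 ▸ hy
  unfold ccGet
  by_cases hyy : y' = y
  · subst hyy
    have hxx : x' ≠ x := fun he => hne (by rw [he])
    have h1 : (ccSet dist y' x v).getD y' [] = (dist.getD y' []).set x v := by
      rw [ccSet, List.getD_eq_getElem?_getD, List.getElem?_set_self hyl]; rfl
    rw [h1, List.getD_eq_getElem?_getD, List.getElem?_set_ne (Ne.symm hxx),
      ← List.getD_eq_getElem?_getD]
  · have h1 : (ccSet dist y x v).getD y' [] = dist.getD y' [] := by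
      rw [ccSet, List.getD_eq_getElem?_getD, List.getElem?_set_ne (fun he => hyy he.symm),
        ← List.getD_eq_getElem?_getD]
    rw [h1]

-- ---- Manhattan distance lemmas ----

theorem ccD1_nonneg (a b : Nat × Nat) : 0 ≤ ccD1 a b :=
  add_nonneg (abs_nonneg _) (abs_nonneg _)

theorem ccD1_self (a : Nat × Nat) : ccD1 a a = 0 := by simp [ccD1]

theorem ccD1_symm (a b : Nat × Nat) : ccD1 a b = ccD1 b a := by
  simp [ccD1, abs_sub_comm]

theorem ccD1_triangle (a b c : Nat × Nat) : ccD1 a c ≤ ccD1 a b + ccD1 b c := by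
  have h1 := abs_sub_le ((a.1 : Int)) (b.1 : Int) (c.1 : Int)
  have h2 := abs_sub_le ((a.2 : Int)) (b.2 : Int) (c.2 : Int)
  simp only [ccD1]; omega

theorem ccD1_eq_zero {a b : Nat × Nat} (h : ccD1 a b = 0) : a = b := by
  have h1 := abs_nonneg ((a.1 : Int) - (b.1 : Int))
  have h2 := abs_nonneg ((a.2 : Int) - (b.2 : Int))
  have e1 : |(a.1 : Int) - (b.1 : Int)| = 0 := by simp only [ccD1] at h; omega
  have e2 : |(a.2 : Int) - (b.2 : Int)| = 0 := by simp only [ccD1] at h; omega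
  rw [abs_eq_zero, sub_eq_zero] at e1 e2
  exact Prod.ext (by exact_mod_cast e1) (by exact_mod_cast e2)

-- ---- target-distance (ccT) lemmas ----

theorem ccT_le {obs : List (Nat × Nat)} {o : Nat × Nat} (h : o ∈ obs) (c : Nat × Nat) :
    ccT obs c ≤ ccD1 c o := by
  have hne : (obs.map (ccD1 c)) ≠ [] := by simp; rintro rfl; simp at h
  cases hm : (obs.map (ccD1 c)).min? with
  | none => exact absurd (List.min?_eq_none_iff.mp hm) hne
  | some m =>
      rw [ccT, hm]
      obtain ⟨-, hle⟩ := List.min?_eq_some_iff.mp hm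
      exact hle _ (List.mem_map_of_mem h)

theorem ccT_exists {obs : List (Nat × Nat)} (h : obs ≠ []) (c : Nat × Nat) :
    ∃ o ∈ obs, ccT obs c = ccD1 c o := by
  have hne : (obs.map (ccD1 c)) ≠ [] := by simpa using h
  cases hm : (obs.map (ccD1 c)).min? with
  | none => exact absurd (List.min?_eq_none_iff.mp hm) hne
  | some m =>
      obtain ⟨hmem, -⟩ := List.min?_eq_some_iff.mp hm
      obtain ⟨o, ho, rfl⟩ := List.mem_map.mp hmem
      exact ⟨o, ho, by rw [ccT, hm]; rfl⟩

theorem ccT_nonneg (obs : List (Nat × Nat)) (c : Nat × Nat) : 0 ≤ ccT obs c := by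
  by_cases h : obs = []
  · subst h; simp [ccT, ccINF]
  · obtain ⟨o, -, he⟩ := ccT_exists h c
    rw [he]; exact ccD1_nonneg _ _

theorem ccT_self {obs : List (Nat × Nat)} {c : Nat × Nat} (h : c ∈ obs) : ccT obs c = 0 :=
  le_antisymm (by simpa [ccD1_self] using ccT_le h c) (ccT_nonneg _ _)

theorem ccT_eq_zero {obs : List (Nat × Nat)} {c : Nat × Nat} (h : ccT obs c = 0) : c ∈ obs := by
  by_cases hobs : obs = []
  · subst hobs; simp [ccT, ccINF] at h
  · obtain ⟨o, ho, he⟩ := ccT_exists hobs c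
    rw [h] at he
    rwa [ccD1_eq_zero he.symm]

theorem ccT_lip {obs : List (Nat × Nat)} (hobs : obs ≠ []) {a b : Nat × Nat}
    (hadj : ccAdj a b) : ccT obs a ≤ ccT obs b + 1 := by
  obtain ⟨o, ho, he⟩ := ccT_exists hobs b
  have h1 : ccT obs a ≤ ccD1 a o := ccT_le ho a
  have h2 : ccD1 a o ≤ ccD1 a b + ccD1 b o := ccD1_triangle a b o
  rw [ccAdj] at hadj
  omega

theorem ccT_bound {H W : Nat} {obs : List (Nat × Nat)} (hobs : obs ≠ [])
    (obsr : ∀ o ∈ obs, o.1 < H ∧ o.2 < W) {c : Nat × Nat} (hc1 : c.1 < H) (hc2 : c.2 < W) :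
    ccT obs c ≤ ((H : Int) - 1) + ((W : Int) - 1) := by
  obtain ⟨o, ho, he⟩ := ccT_exists hobs c
  obtain ⟨ho1, ho2⟩ := obsr o ho
  have e1 : |(c.1 : Int) - (o.1 : Int)| ≤ (H : Int) - 1 := by rw [abs_sub_le_iff]; omega
  have e2 : |(c.2 : Int) - (o.2 : Int)| ≤ (W : Int) - 1 := by rw [abs_sub_le_iff]; omega
  rw [he]; rw [ccD1]; omega

-- ---- adjacency vs the direction list ----

theorem ccAdj_symm {a b : Nat × Nat} (h : ccAdj a b) : ccAdj b a := by
  rwa [ccAdj, ccD1_symm]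

theorem ccAdj_of_delta {y x : Nat} {n : Nat × Nat} {a b : Int} (h1 : (n.1 : Int) = (y : Int) + a)
    (h2 : (n.2 : Int) = (x : Int) + b) (hab : |a| + |b| = 1) : ccAdj (y, x) n := by
  rw [ccAdj, ccD1, show (y : Int) - (n.1 : Int) = -a by omega,
    show (x : Int) - (n.2 : Int) = -b by omega, abs_neg, abs_neg]
  exact hab

theorem ccAdj_of_dir {y x : Nat} {d : Int × Int} (hd : d ∈ ccDirs) {n : Nat × Nat}
    (h1 : (n.1 : Int) = (y : Int) + d.1) (h2 : (n.2 : Int) = (x : Int) + d.2) :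
    ccAdj (y, x) n := by
  fin_cases hd <;> exact ccAdj_of_delta h1 h2 (by decide)

theorem ccAdj_to_dir {y x : Nat} {n : Nat × Nat} (h : ccAdj (y, x) n) :
    ∃ d ∈ ccDirs, (n.1 : Int) = (y : Int) + d.1 ∧ (n.2 : Int) = (x : Int) + d.2 := by
  have h' : |(y : Int) - (n.1 : Int)| + |(x : Int) - (n.2 : Int)| = 1 := h
  have h4 : ((n.1 : Int) = y + 1 ∧ (n.2 : Int) = x) ∨ ((n.1 : Int) = y - 1 ∧ (n.2 : Int) = x) ∨
      ((n.1 : Int) = y ∧ (n.2 : Int) = x + 1) ∨ ((n.1 : Int) = y ∧ (n.2 : Int) = x - 1) := by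
    rcases abs_cases ((y : Int) - (n.1 : Int)) with ⟨e1, s1⟩ | ⟨e1, s1⟩ <;>
      rcases abs_cases ((x : Int) - (n.2 : Int)) with ⟨e2, s2⟩ | ⟨e2, s2⟩ <;> omega
  rcases h4 with ⟨e1, e2⟩ | ⟨e1, e2⟩ | ⟨e1, e2⟩ | ⟨e1, e2⟩
  · exact ⟨(1, 0), by simp [ccDirs], by simpa using e1, by simpa using e2⟩
  · exact ⟨(-1, 0), by simp [ccDirs], by simpa using e1, by simpa using e2⟩
  · exact ⟨(0, 1), by simp [ccDirs], by simpa using e1, by simpa using e2⟩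
  · exact ⟨(0, -1), by simp [ccDirs], by simpa using e1, by simpa using e2⟩

-- a one-step move from c towards an achieving obstacle: a neighbour one closer
theorem absDecUp {u v : Int} (h : u < v) : |u + 1 - v| = |u - v| - 1 := by
  rw [abs_of_nonpos (by omega), abs_of_nonpos (by omega)]; ring
theorem absDecDown {u v : Int} (h : v < u) : |u - 1 - v| = |u - v| - 1 := by
  rw [abs_of_nonneg (by omega), abs_of_nonneg (by omega)]; ring

theorem ccT_step_down {H W : Nat} {obs : List (Nat × Nat)} (hobs : obs ≠ [])
    (obsr : ∀ o ∈ obs, o.1 < H ∧ o.2 < W) {c : Nat × Nat} (hc1 : c.1 < H) (hc2 : c.2 < W)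
    (hpos : 1 ≤ ccT obs c) :
    ∃ m : Nat × Nat, m.1 < H ∧ m.2 < W ∧ ccAdj c m ∧ ccT obs m = ccT obs c - 1 := by
  obtain ⟨o, ho, he⟩ := ccT_exists hobs c
  obtain ⟨ho1, ho2⟩ := obsr o ho
  have hm : ∃ m : Nat × Nat, m.1 < H ∧ m.2 < W ∧ ccAdj c m ∧ ccD1 m o = ccD1 c o - 1 := by
    rcases lt_trichotomy c.1 o.1 with hlt | heq | hgt
    · have hlt' : (c.1 : Int) < (o.1 : Int) := by exact_mod_cast hlt
      refine ⟨(c.1 + 1, c.2), by omega, hc2, ?_, ?_⟩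
      · simp only [ccAdj, ccD1]; push_cast
        rw [show (c.1 : Int) - ((c.1 : Int) + 1) = -1 by ring]; simp
      · simp only [ccD1]; push_cast
        rw [absDecUp hlt']; ring
    · rcases lt_trichotomy c.2 o.2 with h2 | h2 | h2
      · have h2' : (c.2 : Int) < (o.2 : Int) := by exact_mod_cast h2
        refine ⟨(c.1, c.2 + 1), hc1, by omega, ?_, ?_⟩
        · simp only [ccAdj, ccD1]; push_cast
          rw [show (c.2 : Int) - ((c.2 : Int) + 1) = -1 by ring]; simp
        · simp only [ccD1]; push_cast
          rw [absDecUp h2']; ring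
      · exfalso
        have : c = o := Prod.ext heq h2
        rw [← this, ccD1_self] at he; omega
      · have h2' : (o.2 : Int) < (c.2 : Int) := by exact_mod_cast h2
        have hc2' : 1 ≤ c.2 := by omega
        have hcast : ((c.2 - 1 : Nat) : Int) = (c.2 : Int) - 1 := by omega
        refine ⟨(c.1, c.2 - 1), hc1, by omega, ?_, ?_⟩
        · simp only [ccAdj, ccD1, hcast]
          rw [show (c.2 : Int) - ((c.2 : Int) - 1) = 1 by ring]; simp
        · simp only [ccD1, hcast]
          rw [absDecDown h2']; ring
    · have hgt' : (o.1 : Int) < (c.1 : Int) := by exact_mod_cast hgt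
      have hc1' : 1 ≤ c.1 := by omega
      have hcast : ((c.1 - 1 : Nat) : Int) = (c.1 : Int) - 1 := by omega
      refine ⟨(c.1 - 1, c.2), by omega, hc2, ?_, ?_⟩
      · simp only [ccAdj, ccD1, hcast]
        rw [show (c.1 : Int) - ((c.1 : Int) - 1) = 1 by ring]; simp
      · simp only [ccD1, hcast]
        rw [absDecDown hgt']; ring
  obtain ⟨m, hm1, hm2, hmadj, hmd⟩ := hm
  refine ⟨m, hm1, hm2, hmadj, le_antisymm ?_ ?_⟩
  · exact le_of_le_of_eq (ccT_le ho m) (by rw [hmd, ← he])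
  · have := ccT_lip hobs hmadj
    omega


-- ---- obstacle list membership ----

theorem mem_ccObs {grid : List (List Int)} {c : Nat × Nat} :
    c ∈ ccObs grid ↔ c.1 < grid.length ∧ c.2 < (grid.headD []).length ∧
      (grid.getD c.1 []).getD c.2 0 = 1 := by
  constructor
  · intro h
    simp only [ccObs, List.mem_flatMap, List.mem_filterMap, List.mem_range] at h
    obtain ⟨y, hy, x, hx, hif⟩ := h
    split at hif
    · next hc =>
        obtain rfl := Option.some.inj hif
        exact ⟨hy, hx, hc⟩
    · exact absurd hif (by simp)
  · rintro ⟨h1, h2, h3⟩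
    simp only [ccObs, List.mem_flatMap, List.mem_filterMap, List.mem_range]
    exact ⟨c.1, h1, c.2, h2, by rw [if_pos h3]⟩

theorem ccObs_length_le (grid : List (List Int)) :
    (ccObs grid).length ≤ grid.length * (grid.headD []).length := by
  rw [ccObs, List.length_flatMap]
  calc ((List.range grid.length).map fun y =>
        ((List.range (grid.headD []).length).filterMap (fun x =>
          if (grid.getD y []).getD x 0 = 1 then some (y, x) else none)).length).sum
      ≤ ((List.range grid.length).map fun y =>
        ((List.range (grid.headD []).length).filterMap (fun x =>
          if (grid.getD y []).getD x 0 = 1 then some (y, x) else none)).length).length *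
          (grid.headD []).length := by
        apply List.sum_le_card_nsmul
        intro a ha
        simp only [List.mem_map] at ha
        obtain ⟨y, -, rfl⟩ := ha
        exact le_trans (List.length_filterMap_le _ _) (by simp)
    _ = grid.length * (grid.headD []).length := by simp
  
-- ---- INF-cell counting ----

theorem ccInfCount_le (H W : Nat) (dist : List (List Int)) : ccInfCount H W dist ≤ H * W := by
  calc ccInfCount H W dist ≤ ((Finset.range H) ×ˢ (Finset.range W)).card :=
        Finset.card_filter_le _ _
    _ = H * W := by simp

theorem ccInfCount_set {H W : Nat} {dist : List (List Int)} (h : ccShape H W dist) {y x : Nat}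
    (hy : y < H) (hx : x < W) (hI : ccGet dist y x = ccINF) {v : Int} (hv : v ≠ ccINF) :
    ccInfCount H W (ccSet dist y x v) + 1 = ccInfCount H W dist := by
  have hmem : (y, x) ∈ ((Finset.range H) ×ˢ (Finset.range W)).filter
      (fun c => ccGet dist c.1 c.2 = ccINF) := by
    simp [Finset.mem_filter, Finset.mem_product, hy, hx, hI]
  have hset : ((Finset.range H) ×ˢ (Finset.range W)).filter
      (fun c => ccGet (ccSet dist y x v) c.1 c.2 = ccINF) =
      (((Finset.range H) ×ˢ (Finset.range W)).filter
      (fun c => ccGet dist c.1 c.2 = ccINF)).erase (y, x) := by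
    ext c
    simp only [Finset.mem_filter, Finset.mem_erase, Finset.mem_product, Finset.mem_range]
    constructor
    · rintro ⟨⟨hc1, hc2⟩, hcI⟩
      by_cases hc : c = (y, x)
      · subst hc
        rw [ccGet_set_self h hy hx] at hcI; exact absurd hcI hv
      · rw [ccGet_set_ne h hy hx v (by simpa using hc)] at hcI
        exact ⟨hc, ⟨hc1, hc2⟩, hcI⟩
    · rintro ⟨hne, ⟨hc1, hc2⟩, hcI⟩
      refine ⟨⟨hc1, hc2⟩, ?_⟩
      rw [ccGet_set_ne h hy hx v (by simpa using hne)]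
      exact hcI
  rw [ccInfCount, hset, Finset.card_erase_of_mem hmem, ccInfCount]
  have : 1 ≤ (((Finset.range H) ×ˢ (Finset.range W)).filter
      (fun c => ccGet dist c.1 c.2 = ccINF)).card := Finset.card_pos.mpr ⟨_, hmem⟩
  omega


-- ---- characterization of the seeding phase ----

def ccObsHW (grid : List (List Int)) (H W : Nat) : List (Nat × Nat) :=
  (List.range H).flatMap (fun y => (List.range W).filterMap (fun x =>
    if (grid.getD y []).getD x 0 = 1 then some (y, x) else none))

theorem ccObs_eq (grid : List (List Int)) :
    ccObs grid = ccObsHW grid grid.length (grid.headD []).length := rfl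

def ccIStep (grid : List (List Int)) (y : Nat) (s : List (List Int) × List (Nat × Nat))
    (x : Nat) : List (List Int) × List (Nat × Nat) :=
  if (grid.getD y []).getD x 0 = 1 then (ccSet s.1 y x 0, s.2 ++ [(y, x)]) else s

theorem ccInit_row (grid : List (List Int)) (H W y : Nat) (hy : y < H) :
    ∀ (n : Nat) (s : List (List Int) × List (Nat × Nat)), n ≤ W → ccShape H W s.1 →
      ccShape H W ((List.range n).foldl (ccIStep grid y) s).1 ∧
      ((List.range n).foldl (ccIStep grid y) s).2 =
        s.2 ++ (List.range n).filterMap (fun x =>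
          if (grid.getD y []).getD x 0 = 1 then some (y, x) else none) ∧
      ∀ y', y' < H → ∀ x', x' < W →
        ccGet ((List.range n).foldl (ccIStep grid y) s).1 y' x' =
          if y' = y ∧ x' < n ∧ (grid.getD y []).getD x' 0 = 1 then 0
          else ccGet s.1 y' x' := by
  intro n
  induction n with
  | zero =>
      intro s _ hs
      refine ⟨hs, by simp, ?_⟩
      intro y' hy' x' hx'
      simp
  | succ n ih =>
      intro s hn hs
      have hnW : n < W := by omega
      obtain ⟨ih1, ih2, ih3⟩ := ih s (by omega) hs
      rw [List.range_succ, List.foldl_append, List.foldl_cons, List.foldl_nil]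
      by_cases hc : (grid.getD y []).getD n 0 = 1
      · have hstep : ccIStep grid y ((List.range n).foldl (ccIStep grid y) s) n =
            (ccSet ((List.range n).foldl (ccIStep grid y) s).1 y n 0,
             ((List.range n).foldl (ccIStep grid y) s).2 ++ [(y, n)]) := by
          rw [ccIStep, if_pos hc]
        rw [hstep]
        refine ⟨ccShape_set ih1 hy hnW 0, ?_, ?_⟩
        · rw [List.filterMap_append, ih2, List.append_assoc]
          have hc' : (grid[y]?.getD [])[n]?.getD 0 = (1 : Int) := by
            simpa [List.getD_eq_getElem?_getD] using hc
          simp [hc']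
        · intro y' hy' x' hx'
          by_cases hpn : y' = y ∧ x' = n
          · obtain ⟨rfl, rfl⟩ := hpn
            rw [ccGet_set_self ih1 hy hnW 0, if_pos ⟨rfl, by omega, hc⟩]
          · have hne : (y', x') ≠ (y, n) := by simpa [Prod.ext_iff] using hpn
            rw [ccGet_set_ne ih1 hy hnW 0 hne, ih3 y' hy' x' hx']
            have hiff : (y' = y ∧ x' < n + 1 ∧ (grid.getD y []).getD x' 0 = 1) ↔
                (y' = y ∧ x' < n ∧ (grid.getD y []).getD x' 0 = 1) := by
              constructor <;> rintro ⟨ha, hb, hcell⟩ <;> refine ⟨ha, ?_, hcell⟩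
              · have : x' ≠ n := fun he => hpn ⟨ha, he⟩
                omega
              · omega
            rw [if_congr hiff rfl rfl]
      · have hstep : ccIStep grid y ((List.range n).foldl (ccIStep grid y) s) n =
            (List.range n).foldl (ccIStep grid y) s := by
          rw [ccIStep, if_neg hc]
        rw [hstep]
        refine ⟨ih1, ?_, ?_⟩
        · rw [List.filterMap_append, ih2]
          have hc' : ¬ (grid[y]?.getD [])[n]?.getD 0 = (1 : Int) := by
            simpa [List.getD_eq_getElem?_getD] using hc
          simp [hc']
        · intro y' hy' x' hx'
          rw [ih3 y' hy' x' hx']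
          have hiff : (y' = y ∧ x' < n + 1 ∧ (grid.getD y []).getD x' 0 = 1) ↔
              (y' = y ∧ x' < n ∧ (grid.getD y []).getD x' 0 = 1) := by
            constructor <;> rintro ⟨ha, hb, hcell⟩ <;> refine ⟨ha, ?_, hcell⟩
            · have : x' ≠ n := by
                rintro rfl
                exact hc (ha ▸ hcell)
              omega
            · omega
          rw [if_congr hiff rfl rfl]

theorem ccInit_outer (grid : List (List Int)) (H W : Nat) :
    ∀ (m : Nat) (s : List (List Int) × List (Nat × Nat)), m ≤ H → ccShape H W s.1 →
      ccShape H W ((List.range m).foldl (fun s y => (List.range W).foldl (ccIStep grid y) s) s).1 ∧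
      ((List.range m).foldl (fun s y => (List.range W).foldl (ccIStep grid y) s) s).2 =
        s.2 ++ (List.range m).flatMap (fun y => (List.range W).filterMap (fun x =>
          if (grid.getD y []).getD x 0 = 1 then some (y, x) else none)) ∧
      ∀ y', y' < H → ∀ x', x' < W →
        ccGet ((List.range m).foldl (fun s y => (List.range W).foldl (ccIStep grid y) s) s).1 y' x' =
          if y' < m ∧ (grid.getD y' []).getD x' 0 = 1 then 0 else ccGet s.1 y' x' := by
  intro m
  induction m with
  | zero =>
      intro s _ hs
      refine ⟨hs, by simp, ?_⟩
      intro y' hy' x' hx'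
      simp
  | succ m ih =>
      intro s hm hs
      have hmH : m < H := by omega
      obtain ⟨ih1, ih2, ih3⟩ := ih s (by omega) hs
      rw [List.range_succ, List.foldl_append, List.foldl_cons, List.foldl_nil]
      obtain ⟨r1, r2, r3⟩ := ccInit_row grid H W m hmH W
        ((List.range m).foldl (fun s y => (List.range W).foldl (ccIStep grid y) s) s) le_rfl ih1
      refine ⟨r1, ?_, ?_⟩
      · rw [r2, ih2, List.flatMap_append, List.append_assoc]
        simp
      · intro y' hy' x' hx'
        rw [r3 y' hy' x' hx']
        by_cases h1 : y' = m
        · subst h1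
          by_cases hcell : (grid.getD y' []).getD x' 0 = 1
          · rw [if_pos ⟨rfl, hx', hcell⟩, if_pos ⟨by omega, hcell⟩]
          · rw [if_neg (by tauto), if_neg (by tauto), ih3 y' hy' x' hx',
              if_neg (by omega)]
        · rw [if_neg (by tauto), ih3 y' hy' x' hx']
          have hiff : (y' < m ∧ (grid.getD y' []).getD x' 0 = 1) ↔
              (y' < m + 1 ∧ (grid.getD y' []).getD x' 0 = 1) := by
            constructor <;> rintro ⟨ha, hb⟩ <;> refine ⟨by omega, hb⟩
          rw [if_congr hiff rfl rfl]

theorem ccStart_shape (H W : Nat) : ccShape H W (List.replicate H (List.replicate W ccINF)) := by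
  refine ⟨by simp, ?_⟩
  intro r hr
  rw [List.eq_of_mem_replicate hr]
  simp

theorem ccStart_get (H W : Nat) {y x : Nat} (hy : y < H) (hx : x < W) :
    ccGet (List.replicate H (List.replicate W ccINF)) y x = ccINF := by
  simp [ccGet, List.getD_eq_getElem?_getD, List.getElem?_replicate, hy, hx]

theorem ccInit_char (grid : List (List Int)) (H W : Nat) :
    ccShape H W (ccInit grid H W).1 ∧ (ccInit grid H W).2 = ccObsHW grid H W ∧
    ∀ y', y' < H → ∀ x', x' < W →
      ccGet (ccInit grid H W).1 y' x' =
        if (grid.getD y' []).getD x' 0 = 1 then 0 else ccINF := by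
  have he : ccInit grid H W = (List.range H).foldl
      (fun s y => (List.range W).foldl (ccIStep grid y) s)
      (List.replicate H (List.replicate W ccINF), []) := rfl
  obtain ⟨o1, o2, o3⟩ := ccInit_outer grid H W H
    (List.replicate H (List.replicate W ccINF), []) le_rfl (ccStart_shape H W)
  rw [he]
  refine ⟨o1, by rw [o2]; simp [ccObsHW], ?_⟩
  intro y' hy' x' hx'
  rw [o3 y' hy' x' hx']
  by_cases hcell : (grid.getD y' []).getD x' 0 = 1
  · rw [if_pos ⟨hy', hcell⟩, if_pos hcell]
  · rw [if_neg (by tauto), if_neg hcell]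
    exact ccStart_get H W hy' hx'


-- ---- the key lower bound: INF cells lie strictly beyond the popped cell ----

theorem cc_key {H W : Nat} {obs : List (Nat × Nat)} (hobs : obs ≠ [])
    (obsr : ∀ o ∈ obs, o.1 < H ∧ o.2 < W) {dist : List (List Int)} {p : Nat × Nat}
    {q : List (Nat × Nat)} (inv : CCInv H W obs dist (p :: q)) :
    ∀ c : Nat × Nat, c.1 < H → c.2 < W → ccGet dist c.1 c.2 = ccINF →
      ccT obs p + 1 ≤ ccT obs c := by
  rintro ⟨c1, c2⟩ hc1 hc2 hcI
  have hlow : ccT obs p ≤ ccT obs (c1, c2) :=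
    inv.lower c1 hc1 c2 hc2 hcI p List.mem_cons_self
  by_contra hlt
  push_neg at hlt
  have heq : ccT obs (c1, c2) = ccT obs p := by omega
  by_cases h0 : ccT obs p = 0
  · exact (inv.zero c1 hc1 c2 hc2 (by omega)) hcI
  · have hpos : 1 ≤ ccT obs (c1, c2) := by
      have := ccT_nonneg obs p
      omega
    obtain ⟨⟨m1, m2⟩, hm1, hm2, hmadj, hmT⟩ := ccT_step_down hobs obsr hc1 hc2 hpos
    have hmset : ccGet dist m1 m2 ≠ ccINF := by
      intro hmI
      have := inv.lower m1 hm1 m2 hm2 hmI p List.mem_cons_self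
      omega
    have hmq : (m1, m2) ∉ p :: q := by
      intro hmem
      have hple : ccT obs p ≤ ccT obs (m1, m2) := by
        rcases List.mem_cons.mp hmem with he | hq2
        · rw [← he]
        · exact ((List.pairwise_cons.mp inv.mono).1 (m1, m2) hq2).1
      omega
    exact (inv.closed m1 hm1 m2 hm2 hmset hmq (c1, c2) hc1 hc2 (ccAdj_symm hmadj)) hcI

-- ---- invariant maintained during the inner directions fold ----

structure CCMid (H W : Nat) (obs : List (Nat × Nat)) (y x : Nat) (dist0 : List (List Int))
    (q0 : List (Nat × Nat)) (s : List (List Int) × List (Nat × Nat)) : Prop where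
  shape : ccShape H W s.1
  qmem : ∀ e ∈ s.2, e.1 < H ∧ e.2 < W
  vals : ∀ y' < H, ∀ x' < W, ccGet s.1 y' x' ≠ ccINF → ccGet s.1 y' x' = ccT obs (y', x')
  qset : ∀ e ∈ s.2, ccGet s.1 e.1 e.2 ≠ ccINF
  mono : ((y, x) :: s.2).Pairwise (ccRel obs)
  lower : ∀ y' < H, ∀ x' < W, ccGet s.1 y' x' = ccINF → ∀ e ∈ s.2, ccT obs e ≤ ccT obs (y', x')
  closed : ∀ y' < H, ∀ x' < W, (y', x') ≠ (y, x) → ccGet s.1 y' x' ≠ ccINF → (y', x') ∉ s.2 →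
    ∀ n : Nat × Nat, n.1 < H → n.2 < W → ccAdj (y', x') n → ccGet s.1 n.1 n.2 ≠ ccINF
  zero : ∀ y' < H, ∀ x' < W, ccT obs (y', x') = 0 → ccGet s.1 y' x' ≠ ccINF
  mon : ∀ y' < H, ∀ x' < W, ccGet dist0 y' x' ≠ ccINF → ccGet s.1 y' x' = ccGet dist0 y' x'
  meas : 5 * ccInfCount H W s.1 + s.2.length ≤ 5 * ccInfCount H W dist0 + q0.length

theorem cc_step {H W : Nat} {obs : List (Nat × Nat)} (hobs : obs ≠ [])
    (obsr : ∀ o ∈ obs, o.1 < H ∧ o.2 < W) (hsize : (H : Int) + (W : Int) ≤ 1000000001)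
    {y x : Nat} (hy : y < H) (hx : x < W) {dist0 : List (List Int)} {q0 : List (Nat × Nat)}
    (hval : ccGet dist0 y x = ccT obs (y, x))
    (key : ∀ c : Nat × Nat, c.1 < H → c.2 < W → ccGet dist0 c.1 c.2 = ccINF →
      ccT obs (y, x) + 1 ≤ ccT obs c)
    {d : Int × Int} (hd : d ∈ ccDirs) {s : List (List Int) × List (Nat × Nat)}
    (mid : CCMid H W obs y x dist0 q0 s) :
    CCMid H W obs y x dist0 q0 (ccStep H W y x s d) ∧
    (∀ c : Nat × Nat, c.1 < H → c.2 < W → ccGet s.1 c.1 c.2 ≠ ccINF →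
      ccGet (ccStep H W y x s d).1 c.1 c.2 ≠ ccINF) ∧
    (∀ n : Nat × Nat, (n.1 : Int) = (y : Int) + d.1 → (n.2 : Int) = (x : Int) + d.2 →
      n.1 < H → n.2 < W → ccGet (ccStep H W y x s d).1 n.1 n.2 ≠ ccINF) := by
  have hINF : ccINF = 1000000000 := by norm_num [ccINF]
  have hTyx_lt : ccT obs (y, x) < ccINF := by
    have := ccT_bound hobs obsr (c := (y, x)) hy hx
    omega
  have hdvI : ccGet dist0 y x ≠ ccINF := by
    rw [hval]; omega
  have hgety : ccGet s.1 y x = ccT obs (y, x) := by rw [mid.mon y hy x hx hdvI, hval]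
  by_cases hg : 0 ≤ (y : Int) + d.1 ∧ (y : Int) + d.1 < (H : Int) ∧ 0 ≤ (x : Int) + d.2 ∧
      (x : Int) + d.2 < (W : Int) ∧ ccGet s.1 ((y : Int) + d.1).toNat ((x : Int) + d.2).toNat = ccINF
  · obtain ⟨hg1, hg2, hg3, hg4, hg5⟩ := hg
    set a : Nat := ((y : Int) + d.1).toNat with ha
    set b : Nat := ((x : Int) + d.2).toNat with hb
    have hstep : ccStep H W y x s d =
        (ccSet s.1 a b (ccGet s.1 y x + 1), s.2 ++ [(a, b)]) := by
      simp only [ccStep]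
      rw [if_pos ⟨hg1, hg2, hg3, hg4, hg5⟩]
    have hfst : (ccStep H W y x s d).1 = ccSet s.1 a b (ccGet s.1 y x + 1) := by rw [hstep]
    have hsnd : (ccStep H W y x s d).2 = s.2 ++ [(a, b)] := by rw [hstep]
    have hcasta : (a : Int) = (y : Int) + d.1 := Int.toNat_of_nonneg hg1
    have hcastb : (b : Int) = (x : Int) + d.2 := Int.toNat_of_nonneg hg3
    have hnH : a < H := by omega
    have hnW : b < W := by omega
    have hadj : ccAdj (y, x) (a, b) := ccAdj_of_dir hd hcasta hcastb
    have hnI : ccGet s.1 a b = ccINF := hg5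
    have hnI0 : ccGet dist0 a b = ccINF := by
      by_contra hnn
      rw [mid.mon a hnH b hnW hnn] at hnI
      exact hnn hnI
    have hTn_ge : ccT obs (y, x) + 1 ≤ ccT obs (a, b) := key (a, b) hnH hnW hnI0
    have hTn_le : ccT obs (a, b) ≤ ccT obs (y, x) + 1 := ccT_lip hobs (ccAdj_symm hadj)
    have hTn : ccT obs (a, b) = ccT obs (y, x) + 1 := le_antisymm hTn_le hTn_ge
    have hvI : ccT obs (y, x) + 1 ≠ ccINF := by
      have := ccT_bound hobs obsr (c := (a, b)) hnH hnW
      omega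
    have hwv : ccGet s.1 y x + 1 = ccT obs (y, x) + 1 := by rw [hgety]
    refine ⟨?_, ?_, ?_⟩
    · refine
        { shape := ?_, qmem := ?_, vals := ?_, qset := ?_, mono := ?_, lower := ?_
          closed := ?_, zero := ?_, mon := ?_, meas := ?_ }
      · rw [hfst]
        exact ccShape_set mid.shape hnH hnW _
      · intro e he
        rw [hsnd] at he
        rcases List.mem_append.mp he with h | h
        · exact mid.qmem e h
        · rw [List.mem_singleton.mp h]
          exact ⟨hnH, hnW⟩
      · intro y' hy' x' hx' hne'
        rw [hfst] at hne' ⊢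
        by_cases hp : (y', x') = (a, b)
        · have e1 : y' = a := congrArg Prod.fst hp
          have e2 : x' = b := congrArg Prod.snd hp
          subst e1; subst e2
          rw [ccGet_set_self mid.shape hnH hnW _, hwv, hTn]
        · rw [ccGet_set_ne mid.shape hnH hnW _ hp] at hne' ⊢
          exact mid.vals y' hy' x' hx' hne'
      · intro e he
        rw [hsnd] at he
        rw [hfst]
        rcases List.mem_append.mp he with h | h
        · have hne : (e.1, e.2) ≠ (a, b) := by
            intro hh
            apply mid.qset e h
            have he1 : e.1 = a := congrArg Prod.fst hh
            have he2 : e.2 = b := congrArg Prod.snd hh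
            rw [he1, he2]
            exact hnI
          rw [ccGet_set_ne mid.shape hnH hnW _ hne]
          exact mid.qset e h
        · have he' : e = (a, b) := List.mem_singleton.mp h
          have he1 : e.1 = a := congrArg Prod.fst he'
          have he2 : e.2 = b := congrArg Prod.snd he'
          rw [he1, he2, ccGet_set_self mid.shape hnH hnW _, hwv]
          exact hvI
      · rw [hsnd]
        have hre : (y, x) :: (s.2 ++ [(a, b)]) = ((y, x) :: s.2) ++ [(a, b)] := rfl
        rw [hre, List.pairwise_append]
        refine ⟨mid.mono, List.pairwise_singleton _ _, ?_⟩
        intro e he e' he'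
        rw [List.mem_singleton.mp he']
        rcases List.mem_cons.mp he with rfl | he2
        · exact ⟨by omega, by omega⟩
        · obtain ⟨hr1, hr2⟩ := (List.pairwise_cons.mp mid.mono).1 e he2
          exact ⟨by omega, by omega⟩
      · intro y' hy' x' hx' hI' e he
        rw [hfst] at hI'
        rw [hsnd] at he
        have hne' : (y', x') ≠ (a, b) := by
          intro he2
          have e1 : y' = a := congrArg Prod.fst he2
          have e2 : x' = b := congrArg Prod.snd he2
          rw [e1, e2, ccGet_set_self mid.shape hnH hnW _, hwv] at hI'
          exact hvI hI'
        rw [ccGet_set_ne mid.shape hnH hnW _ hne'] at hI'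
        rcases List.mem_append.mp he with h | h
        · exact mid.lower y' hy' x' hx' hI' e h
        · rw [List.mem_singleton.mp h, hTn]
          have hI0 : ccGet dist0 y' x' = ccINF := by
            by_contra hnn
            rw [mid.mon y' hy' x' hx' hnn] at hI'
            exact hnn hI'
          exact key (y', x') hy' hx' hI0
      · intro y' hy' x' hx' hpne hset' hnot' nb hb1 hb2 hbadj
        rw [hfst] at hset' ⊢
        rw [hsnd] at hnot'
        have hne' : (y', x') ≠ (a, b) := by
          intro he2
          exact hnot' (by rw [he2]; exact List.mem_append_right _ (List.mem_singleton.mpr rfl))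
        rw [ccGet_set_ne mid.shape hnH hnW _ hne'] at hset'
        have hnot2 : (y', x') ∉ s.2 := fun hh => hnot' (List.mem_append_left _ hh)
        have hbase := mid.closed y' hy' x' hx' hpne hset' hnot2 nb hb1 hb2 hbadj
        by_cases hbn : nb = (a, b)
        · have e1 : nb.1 = a := congrArg Prod.fst hbn
          have e2 : nb.2 = b := congrArg Prod.snd hbn
          rw [e1, e2, ccGet_set_self mid.shape hnH hnW _, hwv]
          exact hvI
        · have hbn' : (nb.1, nb.2) ≠ (a, b) := hbn
          rw [ccGet_set_ne mid.shape hnH hnW _ hbn']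
          exact hbase
      · intro y' hy' x' hx' hT0
        rw [hfst]
        by_cases hp : (y', x') = (a, b)
        · have e1 : y' = a := congrArg Prod.fst hp
          have e2 : x' = b := congrArg Prod.snd hp
          rw [e1, e2, ccGet_set_self mid.shape hnH hnW _, hwv]
          exact hvI
        · rw [ccGet_set_ne mid.shape hnH hnW _ hp]
          exact mid.zero y' hy' x' hx' hT0
      · intro y' hy' x' hx' hnn
        rw [hfst]
        have hne' : (y', x') ≠ (a, b) := by
          intro he2
          have e1 : y' = a := congrArg Prod.fst he2
          have e2 : x' = b := congrArg Prod.snd he2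
          rw [e1, e2] at hnn
          exact hnn hnI0
        rw [ccGet_set_ne mid.shape hnH hnW _ hne']
        exact mid.mon y' hy' x' hx' hnn
      · rw [hfst, hsnd]
        have hc := ccInfCount_set mid.shape hnH hnW hnI (v := ccGet s.1 y x + 1)
          (by rw [hwv]; exact hvI)
        have hm := mid.meas
        rw [List.length_append, List.length_singleton]
        omega
    · intro cc hc1 hc2 hcne
      rw [hfst]
      have hp : (cc.1, cc.2) ≠ (a, b) := by
        intro hh
        have e1 : cc.1 = a := congrArg Prod.fst hh
        have e2 : cc.2 = b := congrArg Prod.snd hh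
        rw [e1, e2] at hcne
        exact hcne hnI
      rw [ccGet_set_ne mid.shape hnH hnW _ hp]
      exact hcne
    · intro n h1 h2 h3 h4
      rw [hfst]
      have hn1 : n.1 = a := by omega
      have hn2 : n.2 = b := by omega
      rw [hn1, hn2, ccGet_set_self mid.shape hnH hnW _, hwv]
      exact hvI
  · have hstep : ccStep H W y x s d = s := by
      simp only [ccStep]
      rw [if_neg hg]
    rw [hstep]
    refine ⟨mid, fun c _ _ h => h, ?_⟩
    intro n h1 h2 h3 h4
    intro hI
    have e1 : ((y : Int) + d.1).toNat = n.1 := by omega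
    have e2 : ((x : Int) + d.2).toNat = n.2 := by omega
    exact hg ⟨by omega, by omega, by omega, by omega, by rw [e1, e2]; exact hI⟩

theorem cc_fold {H W : Nat} {obs : List (Nat × Nat)} (hobs : obs ≠ [])
    (obsr : ∀ o ∈ obs, o.1 < H ∧ o.2 < W) (hsize : (H : Int) + (W : Int) ≤ 1000000001)
    {y x : Nat} (hy : y < H) (hx : x < W) {dist0 : List (List Int)} {q0 : List (Nat × Nat)}
    (hval : ccGet dist0 y x = ccT obs (y, x))
    (key : ∀ c : Nat × Nat, c.1 < H → c.2 < W → ccGet dist0 c.1 c.2 = ccINF →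
      ccT obs (y, x) + 1 ≤ ccT obs c) :
    ∀ (ds : List (Int × Int)), (∀ d ∈ ds, d ∈ ccDirs) →
      ∀ s, CCMid H W obs y x dist0 q0 s →
      CCMid H W obs y x dist0 q0 (ds.foldl (ccStep H W y x) s) ∧
      (∀ c : Nat × Nat, c.1 < H → c.2 < W → ccGet s.1 c.1 c.2 ≠ ccINF →
        ccGet ((ds.foldl (ccStep H W y x) s)).1 c.1 c.2 ≠ ccINF) ∧
      (∀ d ∈ ds, ∀ n : Nat × Nat, (n.1 : Int) = (y : Int) + d.1 →
        (n.2 : Int) = (x : Int) + d.2 → n.1 < H → n.2 < W →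
        ccGet ((ds.foldl (ccStep H W y x) s)).1 n.1 n.2 ≠ ccINF) := by
  intro ds
  induction ds with
  | nil => intro _ s mid; exact ⟨mid, fun c _ _ h => h, by simp⟩
  | cons d ds ih =>
      intro hds s mid
      obtain ⟨m1, m2, m3⟩ := cc_step hobs obsr hsize hy hx hval key (hds d (by simp)) mid
      obtain ⟨f1, f2, f3⟩ := ih (fun d' hd' => hds d' (by simp [hd'])) _ m1
      rw [List.foldl_cons]
      refine ⟨f1, ?_, ?_⟩
      · intro c h1 h2 h3
        exact f2 c h1 h2 (m2 c h1 h2 h3)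
      · intro d' hd' n h1 h2 h3 h4
        rcases List.mem_cons.mp hd' with rfl | hmem
        · exact f2 n h3 h4 (m3 n h1 h2 h3 h4)
        · exact f3 d' hmem n h1 h2 h3 h4

theorem cc_pop {H W : Nat} {obs : List (Nat × Nat)} (hobs : obs ≠ [])
    (obsr : ∀ o ∈ obs, o.1 < H ∧ o.2 < W) (hsize : (H : Int) + (W : Int) ≤ 1000000001)
    {dist : List (List Int)} {q : List (Nat × Nat)} {y x : Nat}
    (inv : CCInv H W obs dist ((y, x) :: q)) :
    CCInv H W obs (ccDirs.foldl (ccStep H W y x) (dist, q)).1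
      (ccDirs.foldl (ccStep H W y x) (dist, q)).2 ∧
    5 * ccInfCount H W (ccDirs.foldl (ccStep H W y x) (dist, q)).1 +
      (ccDirs.foldl (ccStep H W y x) (dist, q)).2.length + 1 ≤
      5 * ccInfCount H W dist + ((y, x) :: q).length := by
  have hy : y < H := (inv.qmem (y, x) List.mem_cons_self).1
  have hx : x < W := (inv.qmem (y, x) List.mem_cons_self).2
  have hval : ccGet dist y x = ccT obs (y, x) :=
    inv.vals y hy x hx (inv.qset (y, x) List.mem_cons_self)
  have key := cc_key hobs obsr inv
  have mid0 : CCMid H W obs y x dist q (dist, q) :=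
    { shape := inv.shape
      qmem := fun e he => inv.qmem e (List.mem_cons_of_mem _ he)
      vals := inv.vals
      qset := fun e he => inv.qset e (List.mem_cons_of_mem _ he)
      mono := inv.mono
      lower := fun y' hy' x' hx' hI e he =>
        inv.lower y' hy' x' hx' hI e (List.mem_cons_of_mem _ he)
      closed := by
        intro y' hy' x' hx' hpne hset hnot
        refine inv.closed y' hy' x' hx' hset ?_
        intro hmem
        rcases List.mem_cons.mp hmem with hh | hh
        · exact hpne hh
        · exact hnot hh
      zero := inv.zero
      mon := fun _ _ _ _ _ => rfl
      meas := le_refl _ }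
  obtain ⟨fm, -, f3⟩ := cc_fold hobs obsr hsize hy hx hval key ccDirs (fun d hd => hd) _ mid0
  constructor
  · exact
      { shape := fm.shape
        qmem := fm.qmem
        vals := fm.vals
        qset := fm.qset
        mono := (List.pairwise_cons.mp fm.mono).2
        lower := fm.lower
        zero := fm.zero
        closed := by
          intro y' hy' x' hx' hset hnot nb hb1 hb2 hadj
          by_cases hp : (y', x') = (y, x)
          · obtain ⟨d, hd, e1, e2⟩ := ccAdj_to_dir (hp ▸ hadj)
            exact f3 d hd nb e1 e2 hb1 hb2
          · exact fm.closed y' hy' x' hx' hp hset hnot nb hb1 hb2 hadj }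
  · have hm := fm.meas
    rw [List.length_cons]
    omega

-- ---- queue empty: every cell is determined ----

theorem cc_final {H W : Nat} {obs : List (Nat × Nat)} (hobs : obs ≠ [])
    (obsr : ∀ o ∈ obs, o.1 < H ∧ o.2 < W) {dist : List (List Int)}
    (inv : CCInv H W obs dist []) :
    ∀ y, y < H → ∀ x, x < W → ccGet dist y x = ccT obs (y, x) := by
  have hall : ∀ k : Nat, ∀ c : Nat × Nat, c.1 < H → c.2 < W → ccT obs c = (k : Int) →
      ccGet dist c.1 c.2 ≠ ccINF := by
    intro k
    induction k using Nat.strong_induction_on with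
    | _ k ih =>
        rintro ⟨c1, c2⟩ hc1 hc2 hck
        cases k with
        | zero => exact inv.zero c1 hc1 c2 hc2 (by exact_mod_cast hck)
        | succ k' =>
            have hpos : 1 ≤ ccT obs (c1, c2) := by
              rw [hck]
              exact_mod_cast Nat.succ_le_succ (Nat.zero_le _)
            obtain ⟨m, hm1, hm2, hmadj, hmT⟩ := ccT_step_down hobs obsr hc1 hc2 hpos
            have hmk : ccT obs m = (k' : Int) := by
              rw [hmT, hck]
              push_cast
              ring
            have hmset := ih k' (by omega) m hm1 hm2 hmk
            exact inv.closed m.1 hm1 m.2 hm2 hmset (by simp) (c1, c2) hc1 hc2 (ccAdj_symm hmadj)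
  intro y hy x hx
  by_cases hI : ccGet dist y x = ccINF
  · exfalso
    have hnn := ccT_nonneg obs (y, x)
    exact hall (ccT obs (y, x)).toNat (y, x) hy hx (by rw [Int.toNat_of_nonneg hnn]) hI
  · exact inv.vals y hy x hx hI

-- ---- unfolding equations for the loop ----

theorem ccLoop_nil (H W fuel : Nat) (dist : List (List Int)) :
    ccLoop H W fuel dist [] = dist := by cases fuel <;> rfl

theorem ccLoop_succ (H W fuel : Nat) (dist : List (List Int)) (y x : Nat)
    (q : List (Nat × Nat)) :
    ccLoop H W (fuel + 1) dist ((y, x) :: q) =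
      ccLoop H W fuel (ccDirs.foldl (ccStep H W y x) (dist, q)).1
        (ccDirs.foldl (ccStep H W y x) (dist, q)).2 := rfl

theorem cc_run {H W : Nat} {obs : List (Nat × Nat)} (hobs : obs ≠ [])
    (obsr : ∀ o ∈ obs, o.1 < H ∧ o.2 < W) (hsize : (H : Int) + (W : Int) ≤ 1000000001) :
    ∀ (fuel : Nat) (dist : List (List Int)) (q : List (Nat × Nat)), CCInv H W obs dist q →
      5 * ccInfCount H W dist + q.length ≤ fuel →
      ccShape H W (ccLoop H W fuel dist q) ∧
      ∀ y, y < H → ∀ x, x < W → ccGet (ccLoop H W fuel dist q) y x = ccT obs (y, x) := by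
  intro fuel
  induction fuel with
  | zero =>
      intro dist q inv hf
      cases q with
      | nil => rw [ccLoop_nil]; exact ⟨inv.shape, cc_final hobs obsr inv⟩
      | cons e q' => rw [List.length_cons] at hf; omega
  | succ f ih =>
      intro dist q inv hf
      cases q with
      | nil => rw [ccLoop_nil]; exact ⟨inv.shape, cc_final hobs obsr inv⟩
      | cons e q' =>
          obtain ⟨y, x⟩ := e
          obtain ⟨inv', hm⟩ := cc_pop hobs obsr hsize inv
          rw [ccLoop_succ]
          refine ih _ _ inv' ?_
          rw [List.length_cons] at hf hm
          omega

-- ---- rebuilding the list-of-lists result from the pointwise characterization ----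

theorem cc_pointwise_to_list {H W : Nat} {dist : List (List Int)} (hsh : ccShape H W dist)
    (f : Nat → Nat → Int) (hpt : ∀ y, y < H → ∀ x, x < W → ccGet dist y x = f y x) :
    dist = (List.range H).map (fun y => (List.range W).map (fun x => f y x)) := by
  apply List.ext_getElem (by simp [hsh.1])
  intro i h1 h2
  have hiH : i < H := by rw [← hsh.1]; exact h1
  have hrow : dist[i].length = W := hsh.2 _ (List.getElem_mem h1)
  simp only [List.getElem_map, List.getElem_range]
  apply List.ext_getElem (by simp [hrow])
  intro j j1 j2
  have hjW : j < W := by rw [← hrow]; exact j1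
  simp only [List.getElem_map, List.getElem_range]
  have hv := hpt i hiH j hjW
  have hdrow : dist.getD i [] = dist[i] := by
    rw [List.getD_eq_getElem?_getD, List.getElem?_eq_getElem h1]
    rfl
  rw [ccGet, hdrow, List.getD_eq_getElem?_getD, List.getElem?_eq_getElem j1] at hv
  simpa using hv

theorem cc_alt_eq (grid : List (List Int)) :
    compute_clearance_alt grid = (List.range grid.length).map (fun y =>
      (List.range (grid.headD []).length).map (fun x => ccT (ccObs grid) (y, x))) := by
  simp only [compute_clearance_alt]
  apply List.map_congr_left
  intro y _
  apply List.map_congr_left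
  intro x _
  rw [ccT, ccObs, ccINF]
  have hf : (fun o : Nat × Nat => |(y : Int) - (o.1 : Int)| + |(x : Int) - (o.2 : Int)|) =
      ccD1 (y, x) := by
    funext o
    simp [ccD1]
  rw [hf]

theorem compute_clearance_spec : Claim_equal_compute_clearance := by
  intro grid _ hpre
  obtain ⟨-, -, hsize0⟩ := hpre
  have hsize : (grid.length : Int) + ((grid.headD []).length : Int) ≤ 1000000001 := by
    rw [show ((10 : Int) ^ 9 + 1) = 1000000001 from by norm_num] at hsize0
    exact hsize0
  show compute_clearance grid = compute_clearance_alt grid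
  have hA : compute_clearance grid = ccLoop grid.length (grid.headD []).length
      (6 * grid.length * (grid.headD []).length + 1)
      (ccInit grid grid.length (grid.headD []).length).1
      (ccInit grid grid.length (grid.headD []).length).2 := rfl
  obtain ⟨i1, i2, i3⟩ := ccInit_char grid grid.length (grid.headD []).length
  have hq : (ccInit grid grid.length (grid.headD []).length).2 = ccObs grid := by
    rw [i2, ccObs_eq]
  rw [cc_alt_eq]
  by_cases hobs : ccObs grid = []
  · have hq0 : (ccInit grid grid.length (grid.headD []).length).2 = [] := by rw [hq, hobs]
    rw [hA, hq0, ccLoop_nil]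
    apply cc_pointwise_to_list i1
    intro y hy x hx
    have hcell : ¬ (grid.getD y []).getD x 0 = 1 := by
      intro hc
      have hmem : (y, x) ∈ ccObs grid := mem_ccObs.mpr ⟨hy, hx, hc⟩
      rw [hobs] at hmem
      simp at hmem
    rw [i3 y hy x hx, if_neg hcell, hobs]
    rfl
  · have obsr : ∀ o ∈ ccObs grid, o.1 < grid.length ∧ o.2 < (grid.headD []).length :=
      fun o ho => ⟨(mem_ccObs.mp ho).1, (mem_ccObs.mp ho).2.1⟩
    have h0INF : (0 : Int) ≠ ccINF := by norm_num [ccINF]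
    have inv : CCInv grid.length (grid.headD []).length (ccObs grid)
        (ccInit grid grid.length (grid.headD []).length).1
        (ccInit grid grid.length (grid.headD []).length).2 :=
      { shape := i1
        qmem := fun e he => obsr e (hq ▸ he)
        vals := by
          intro y hy x hx hne
          rw [i3 y hy x hx] at hne ⊢
          by_cases hcell : (grid.getD y []).getD x 0 = 1
          · rw [if_pos hcell]
            exact (ccT_self (mem_ccObs.mpr ⟨hy, hx, hcell⟩)).symm
          · rw [if_neg hcell] at hne
            exact absurd rfl hne
        qset := by
          intro e he
          have hmem : e ∈ ccObs grid := hq ▸ he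
          obtain ⟨h1, h2, h3⟩ := mem_ccObs.mp hmem
          rw [i3 e.1 h1 e.2 h2, if_pos h3]
          exact h0INF
        mono := by
          apply List.pairwise_of_forall_mem_list
          intro e1 he1 e2 he2
          have t1 : ccT (ccObs grid) e1 = 0 := ccT_self (hq ▸ he1)
          have t2 : ccT (ccObs grid) e2 = 0 := ccT_self (hq ▸ he2)
          exact ⟨by omega, by omega⟩
        lower := by
          intro y hy x hx hI e he
          rw [ccT_self (hq ▸ he)]
          exact ccT_nonneg _ _
        closed := by
          intro y hy x hx hset hnot nb hb1 hb2 hadj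
          exfalso
          rw [i3 y hy x hx] at hset
          by_cases hcell : (grid.getD y []).getD x 0 = 1
          · have hmem : (y, x) ∈ ccObs grid := mem_ccObs.mpr ⟨hy, hx, hcell⟩
            rw [← hq] at hmem
            exact hnot hmem
          · rw [if_neg hcell] at hset
            exact hset rfl
        zero := by
          intro y hy x hx hT0
          obtain ⟨h1, h2, h3⟩ := mem_ccObs.mp (ccT_eq_zero hT0)
          rw [i3 y hy x hx, if_pos h3]
          exact h0INF }
    have hlen : (ccInit grid grid.length (grid.headD []).length).2.length ≤
        grid.length * (grid.headD []).length := by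
      rw [hq]
      exact ccObs_length_le grid
    have hcnt := ccInfCount_le grid.length (grid.headD []).length
      (ccInit grid grid.length (grid.headD []).length).1
    obtain ⟨rs, rp⟩ := cc_run hobs obsr hsize
      (6 * grid.length * (grid.headD []).length + 1) _ _ inv (by
        have hmul : 6 * grid.length * (grid.headD []).length =
            6 * (grid.length * (grid.headD []).length) := by ring
        omega)
    rw [hA]
    exact cc_pointwise_to_list rs _ rp
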